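-- pv_equiv track=rewrite | github.com/AyushAgnihotri2025/CP-Solutions | GeeksforGeeks/Python3/Medium/Power of Largest Prime/power-of-largest-prime.py | largePrime
-- ===== SOURCE A (Python) =====
-- def largePrime(n):
--     # code here
--     i = 2
--     d = {}
--     while i*i <= n:
--         while n%i == 0:
--             if i in d:
--                 d[i] += 1
--             else:
--                 d[i] = 1
--             n = n//i
--         i += 1
--     if n>1:
--         if n in d:
--             d[n] += 1
--         else:
--             d[n] = 1
--     if d == {}:
--         return 0
--     if d[max(d)] > 1:
--         return 1
--     return 0
-- ===== SOURCE B (Python) =====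
-- def _spf(m):
--     # smallest divisor >= 2 of m (m >= 2); it is necessarily prime
--     d = 2
--     while d * d <= m:
--         if m % d == 0:
--             return d
--         d += 1
--     return m
--
--
-- def _lpf(m):
--     # largest prime factor of m (m >= 2), by recursively stripping
--     # one smallest prime factor at a time
--     p = _spf(m)
--     q = m // p
--     return p if q == 1 else _lpf(q)
--
--
-- def largePrime(n):
--     if n <= 1:
--         return 0
--     p = _lpf(n)
--     return 1 if n % (p * p) == 0 else 0
-- ===== Notes on version B (the rewrite author's own statement) =====
-- stated objective: alternative
-- what changed: B drops A's dict of prime exponents and the max-key lookup entirely: it computes the largest prime factor by a recursive helper that strips one smallest prime factor at a time, and answers with a single square-divisibility test n % (p*p) == 0.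
import Mathlib
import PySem

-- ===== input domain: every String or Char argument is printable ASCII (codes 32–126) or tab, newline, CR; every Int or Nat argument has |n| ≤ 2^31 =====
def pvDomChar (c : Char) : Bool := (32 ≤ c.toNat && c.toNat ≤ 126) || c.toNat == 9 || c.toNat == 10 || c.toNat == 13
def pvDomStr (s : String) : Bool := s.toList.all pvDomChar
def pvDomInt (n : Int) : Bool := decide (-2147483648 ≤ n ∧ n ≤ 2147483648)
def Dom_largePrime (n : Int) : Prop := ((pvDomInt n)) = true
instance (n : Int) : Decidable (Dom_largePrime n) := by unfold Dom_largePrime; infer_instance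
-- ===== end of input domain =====

-- B drops A's dict of prime exponents and the max-key lookup: it finds the largest prime
-- factor by recursively stripping one smallest prime factor at a time, then answers with a
-- single square-divisibility test n % (p*p) == 0 (alternative decomposition, similar cost).

-- termination facts for the ports' loops (cited by name in decreasing_by)
theorem pvDecInner {i n : Int} (h : 0 < n ∧ 2 ≤ i ∧ PySem.Int.mod n i = 0) :
    (PySem.Int.floordiv n i).toNat < n.toNat := by
  obtain ⟨hn, hi, hm⟩ := h
  rw [PySem.Int.floordiv_eq_ediv_of_pos (by omega)]
  have h2 : n / i < n := by
    have hdvd : i ∣ n := (PySem.Int.mod_eq_zero_iff_dvd n i).mp hm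
    have hq : n / i * i = n := Int.ediv_mul_cancel hdvd
    nlinarith [Int.ediv_nonneg (le_of_lt hn) (by omega : (0:Int) ≤ i)]
  have h3 : 0 ≤ n / i := Int.ediv_nonneg (by omega) (by omega)
  omega

theorem pvSqLe {i n : Int} (h : i * i ≤ n) : i ≤ n := by nlinarith [sq_nonneg i]

-- ===== PORT A =====
-- inner `while n%i == 0` of A; the `0 < n ∧ 2 ≤ i` conjuncts are totality guards only
-- (every reachable call satisfies them; Python's condition is just n % i == 0).
def aInner (i n : Int) (d : PySem.Dict Int Int) : PySem.Dict Int Int × Int :=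
  if h : 0 < n ∧ 2 ≤ i ∧ PySem.Int.mod n i = 0 then
    aInner i (PySem.Int.floordiv n i)
      (if d.contains i then d.modify i 0 (· + 1) else d.insert i 1)
  else (d, n)
termination_by n.toNat
decreasing_by exact pvDecInner h

-- (aInner i n d).2 ≤ n, needed for aOuter's termination
theorem aInner_le (i n : Int) (d : PySem.Dict Int Int) : (aInner i n d).2 ≤ n := by
  fun_induction aInner i n d with
  | case1 n d h ih =>
    have hn := h.1
    have h2 := pvDecInner h
    simp only [dite_eq_ite] at *
    omega
  | case2 => simp

theorem pvDecOuterA (i n : Int) (d : PySem.Dict Int Int) (h : i * i ≤ n) :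
    (((aInner i n d).2) + 1 - (i + 1)).toNat < (n + 1 - i).toNat := by
  have hle : (aInner i n d).2 ≤ n := aInner_le i n d
  have hin : i ≤ n := pvSqLe h
  omega

-- outer `while i*i <= n` of A
def aOuter (i n : Int) (d : PySem.Dict Int Int) : PySem.Dict Int Int × Int :=
  if h : i * i ≤ n then
    aOuter (i + 1) (aInner i n d).2 (aInner i n d).1
  else (d, n)
termination_by (n + 1 - i).toNat
decreasing_by exact pvDecOuterA i n d h

def largePrime (n : Int) : Int :=
  let p := aOuter 2 n PySem.Dict.empty
  let m := p.2
  let d := if 1 < m then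
             (if p.1.contains m then p.1.modify m 0 (· + 1) else p.1.insert m 1)
           else p.1
  if d = PySem.Dict.empty then 0
  else
    match PySem.List.max? d.keys (fun x => x) with
    | some mx => if 1 < d.getD mx 0 then 1 else 0
    | none => 0   -- unreachable: d nonempty

-- ===== PORT B =====
theorem pvDecSpf (d m : Int) (h : d * d ≤ m) :
    (m + 1 - (d + 1)).toNat < (m + 1 - d).toNat := by
  have := pvSqLe h
  omega

-- `while d*d <= m: if m%d==0: return d; d+=1; return m` of B's _spf
def spfLoop (d m : Int) : Int :=
  if h : d * d ≤ m then
    if PySem.Int.mod m d = 0 then d else spfLoop (d + 1) m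
  else m
termination_by (m + 1 - d).toNat
decreasing_by exact pvDecSpf d m h

-- the result of spfLoop divides m and is ≥ 2 (cited by lpf's decreasing_by)
theorem spfLoop_div (d m : Int) (hd : 2 ≤ d) (hm : 2 ≤ m) :
    spfLoop d m ∣ m ∧ 2 ≤ spfLoop d m := by
  fun_induction spfLoop d m with
  | case1 d h hz =>
    exact ⟨(PySem.Int.mod_eq_zero_iff_dvd m d).mp hz, hd⟩
  | case2 d h hz ih => exact ih (by omega)
  | case3 d h => exact ⟨dvd_refl m, hm⟩

theorem pvDecLpf (m : Int) (h : 2 ≤ m) :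
    (PySem.Int.floordiv m (spfLoop 2 m)).toNat < m.toNat := by
  obtain ⟨hdvd, h2⟩ := spfLoop_div 2 m (le_refl 2) h
  rw [PySem.Int.floordiv_eq_ediv_of_pos (by omega)]
  have hq : m / spfLoop 2 m * spfLoop 2 m = m := Int.ediv_mul_cancel hdvd
  have h0 : 0 ≤ m / spfLoop 2 m := Int.ediv_nonneg (by omega) (by omega)
  have : m / spfLoop 2 m < m := by nlinarith
  omega

-- B's _lpf: strip one smallest prime factor, recurse; the `2 ≤ m` guard is a totality
-- guard only (every reachable call satisfies it; Python has no such test).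
def lpf (m : Int) : Int :=
  if h : 2 ≤ m then
    let p := spfLoop 2 m
    let q := PySem.Int.floordiv m p
    if q = 1 then p else lpf q
  else m
termination_by m.toNat
decreasing_by exact pvDecLpf m h

def largePrime_alt (n : Int) : Int :=
  if n ≤ 1 then 0
  else if PySem.Int.mod n (lpf n * lpf n) = 0 then 1 else 0

-- ===== PRECONDITION & SPEC =====
def Spec_largePrime (n : Int) (out : Int) : Prop := out = largePrime_alt n
instance (n : Int) (out : Int) : Decidable (Spec_largePrime n out) := by unfold Spec_largePrime; infer_instance

-- ===== CLAIM (what is proved, stated in full; the proofs are below) =====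
def Claim_equal_largePrime : Prop := ∀ (n : Int), Dom_largePrime n → Spec_largePrime n (largePrime n)

-- ===== LEMMAS AND PROOFS =====

-- dividing a positive multiple by its divisor 2 ≤ i strictly shrinks it
theorem pvDivShrink {n i : Int} (hn : 0 < n) (hi : 2 ≤ i) (hm : PySem.Int.mod n i = 0) :
    0 ≤ PySem.Int.floordiv n i ∧ PySem.Int.floordiv n i < n := by
  rw [PySem.Int.floordiv_eq_ediv_of_pos (by omega)]
  have hdvd : i ∣ n := (PySem.Int.mod_eq_zero_iff_dvd n i).mp hm
  have hq : n / i * i = n := Int.ediv_mul_cancel hdvd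
  have h0 : 0 ≤ n / i := Int.ediv_nonneg (by omega) (by omega)
  exact ⟨h0, by nlinarith⟩

theorem pvDivPos {n i : Int} (hn : 0 < n) (hi : 2 ≤ i) (hm : PySem.Int.mod n i = 0) :
    0 < PySem.Int.floordiv n i := by
  rw [PySem.Int.floordiv_eq_ediv_of_pos (by omega)]
  have hdvd : i ∣ n := (PySem.Int.mod_eq_zero_iff_dvd n i).mp hm
  have hq : n / i * i = n := Int.ediv_mul_cancel hdvd
  by_contra hle
  rw [not_lt] at hle
  nlinarith

theorem pvDivDvd {n i : Int} (_hn : 0 < n) (hi : 2 ≤ i) (hm : PySem.Int.mod n i = 0) :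
    PySem.Int.floordiv n i ∣ n := by
  rw [PySem.Int.floordiv_eq_ediv_of_pos (by omega)]
  have hdvd : i ∣ n := (PySem.Int.mod_eq_zero_iff_dvd n i).mp hm
  exact ⟨i, (Int.ediv_mul_cancel hdvd).symm⟩

-- scalar mirror of A's loops, used ONLY by the proofs (it is neither port):
-- state (largest factor found, its exponent, remaining n)
def cInner (i n c : Int) : Int × Int :=
  if h : 0 < n ∧ 2 ≤ i ∧ PySem.Int.mod n i = 0 then
    cInner i (PySem.Int.floordiv n i) (c + 1)
  else (c, n)
termination_by n.toNat
decreasing_by exact pvDecInner h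

theorem cInner_le (i n c : Int) : (cInner i n c).2 ≤ n := by
  fun_induction cInner i n c with
  | case1 n c h ih =>
    have hn := h.1
    have h2 := pvDecInner h
    omega
  | case2 => simp

theorem pvDecOuterC1 (i n : Int) (h : i * i ≤ n) :
    (((cInner i n 0).2) + 1 - (i + 1)).toNat < (n + 1 - i).toNat := by
  have hle : (cInner i n 0).2 ≤ n := cInner_le i n 0
  have hin : i ≤ n := pvSqLe h
  omega

def cOuter (i n L c : Int) : Int × Int × Int :=
  if h : i * i ≤ n then
    if PySem.Int.mod n i = 0 then
      cOuter (i + 1) (cInner i n 0).2 i (cInner i n 0).1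
    else
      cOuter (i + 1) n L c
  else (L, c, n)
termination_by (n + 1 - i).toNat
decreasing_by
  · exact pvDecOuterC1 i n h
  · exact pvDecSpf i n h

-- the readout of the scalar mirror's final state
def finC (t : Int × Int × Int) : Int :=
  if 1 < t.2.2 then 0 else if t.1 = 0 then 0 else if 1 < t.2.1 then 1 else 0

-- unfolding equations
theorem aInner_stop {i n : Int} (d : PySem.Dict Int Int) (h : ¬ (0 < n ∧ 2 ≤ i ∧ PySem.Int.mod n i = 0)) :
    aInner i n d = (d, n) := by rw [aInner]; simp [h]

theorem aInner_step {i n : Int} (d : PySem.Dict Int Int) (h : 0 < n ∧ 2 ≤ i ∧ PySem.Int.mod n i = 0) :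
    aInner i n d = aInner i (PySem.Int.floordiv n i)
      (if d.contains i then d.modify i 0 (· + 1) else d.insert i 1) := by
  rw [aInner]; simp [h]

theorem cInner_stop {i n : Int} (c : Int) (h : ¬ (0 < n ∧ 2 ≤ i ∧ PySem.Int.mod n i = 0)) :
    cInner i n c = (c, n) := by rw [cInner]; simp [h]

theorem cInner_step {i n : Int} (c : Int) (h : 0 < n ∧ 2 ≤ i ∧ PySem.Int.mod n i = 0) :
    cInner i n c = cInner i (PySem.Int.floordiv n i) (c + 1) := by
  rw [cInner]; simp [h]

theorem aOuter_stop {i n : Int} (d : PySem.Dict Int Int) (h : ¬ i * i ≤ n) :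
    aOuter i n d = (d, n) := by rw [aOuter]; simp [h]

theorem aOuter_step {i n : Int} (d : PySem.Dict Int Int) (h : i * i ≤ n) :
    aOuter i n d = aOuter (i + 1) (aInner i n d).2 (aInner i n d).1 := by
  rw [aOuter]; simp [h]

theorem cOuter_stop {i n : Int} (L c : Int) (h : ¬ i * i ≤ n) :
    cOuter i n L c = (L, c, n) := by rw [cOuter]; simp [h]

theorem cOuter_step_dvd {i n : Int} (L c : Int) (h : i * i ≤ n) (hm : PySem.Int.mod n i = 0) :
    cOuter i n L c = cOuter (i + 1) (cInner i n 0).2 i (cInner i n 0).1 := by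
  rw [cOuter]; simp [h, hm]

theorem cOuter_step_ndvd {i n : Int} (L c : Int) (h : i * i ≤ n) (hm : ¬ PySem.Int.mod n i = 0) :
    cOuter i n L c = cOuter (i + 1) n L c := by
  rw [cOuter]; simp [h, hm]

theorem keys_nil_eq_empty (d : PySem.Dict Int Int) (h : d.keys = []) : d = PySem.Dict.empty := by
  apply PySem.Dict.ext
  have : d.items.map Prod.fst = [] := h
  cases hi : d.items with
  | nil => simp [PySem.Dict.empty]
  | cons a t => rw [hi] at this; simp at this

-- the inner while-loop, running from a dict that already holds key i with count c
theorem innerLoop (i : Int) (K : Nat) : ∀ (n : Int) (d : PySem.Dict Int Int) (c : Int),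
    n.toNat ≤ K → 0 < n → 2 ≤ i → d.contains i = true → d.getD i 0 = c →
    (aInner i n d).2 = (cInner i n c).2 ∧
    0 < (aInner i n d).2 ∧
    (aInner i n d).2 ∣ n ∧
    ¬ (i ∣ (aInner i n d).2) ∧
    (aInner i n d).1.keys = d.keys ∧
    (aInner i n d).1.getD i 0 = (cInner i n c).1 ∧
    (∀ k : Int, k ≠ i → (aInner i n d).1.getD k 0 = d.getD k 0) := by
  induction K with
  | zero => intro n d c hK hn; omega
  | succ K ih =>
    intro n d c hK hn hi hcon hgd
    by_cases hm : PySem.Int.mod n i = 0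
    · have hg : 0 < n ∧ 2 ≤ i ∧ PySem.Int.mod n i = 0 := ⟨hn, hi, hm⟩
      rw [aInner_step d hg, cInner_step c hg, hcon]
      simp only [if_true]
      have hlt := pvDivShrink hn hi hm
      have hpos := pvDivPos hn hi hm
      have hdvd := pvDivDvd hn hi hm
      have hcon' : (d.modify i 0 (· + 1)).contains i = true := by
        rw [PySem.Dict.contains_modify]
        simp
      have hgd' : (d.modify i 0 (· + 1)).getD i 0 = c + 1 := by
        rw [PySem.Dict.getD_modify_self, hgd]
      obtain ⟨e1, e2, e3, e4, e5, e6, e7⟩ :=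
        ih (PySem.Int.floordiv n i) (d.modify i 0 (· + 1)) (c + 1) (by omega) hpos hi hcon' hgd'
      refine ⟨e1, e2, dvd_trans e3 hdvd, e4, ?_, e6, ?_⟩
      · rw [e5, PySem.Dict.keys_modify, PySem.Dict.keys_insert_of_contains]
        exact hcon
      · intro k hk
        rw [e7 k hk, PySem.Dict.getD_modify]
        simp [hk]
    · have hg : ¬ (0 < n ∧ 2 ≤ i ∧ PySem.Int.mod n i = 0) := by tauto
      rw [aInner_stop d hg, cInner_stop c hg]
      exact ⟨rfl, hn, dvd_refl n, fun hd => hm ((PySem.Int.mod_eq_zero_iff_dvd n i).mpr hd), rfl, hgd.symm ▸ rfl, fun k _ => rfl⟩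

-- entering the inner loop at a fresh factor i
theorem innerEntry (i n : Int) (d : PySem.Dict Int Int)
    (hn : 0 < n) (hi : 2 ≤ i) (hm : PySem.Int.mod n i = 0) (hfresh : d.contains i = false) :
    (aInner i n d).2 = (cInner i n 0).2 ∧
    0 < (aInner i n d).2 ∧
    (aInner i n d).2 ∣ n ∧
    ¬ (i ∣ (aInner i n d).2) ∧
    (aInner i n d).1.keys = d.keys ++ [i] ∧
    (aInner i n d).1.getD i 0 = (cInner i n 0).1 ∧
    (∀ k : Int, k ≠ i → (aInner i n d).1.getD k 0 = d.getD k 0) := by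
  have hg : 0 < n ∧ 2 ≤ i ∧ PySem.Int.mod n i = 0 := ⟨hn, hi, hm⟩
  rw [aInner_step d hg, cInner_step 0 hg, hfresh]
  simp only [Bool.false_eq_true, if_false]
  have hpos := pvDivPos hn hi hm
  have hdvd := pvDivDvd hn hi hm
  have hcon' : (d.insert i 1).contains i = true := PySem.Dict.contains_insert_self d i 1
  have hgd' : (d.insert i 1).getD i 0 = (0 : Int) + 1 := by
    rw [PySem.Dict.getD_insert_self]; ring
  obtain ⟨e1, e2, e3, e4, e5, e6, e7⟩ :=
    innerLoop i (PySem.Int.floordiv n i).toNat (PySem.Int.floordiv n i) (d.insert i 1) 1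
      (le_refl _) hpos hi hcon' (by exact_mod_cast hgd')
  refine ⟨e1, e2, dvd_trans e3 hdvd, e4, ?_, e6, ?_⟩
  · rw [e5, PySem.Dict.keys_insert_of_not_contains d 1 hfresh]
  · intro k hk
    rw [e7 k hk, PySem.Dict.getD_insert]
    simp [hk]

-- lockstep invariant between A's dict loop and the scalar mirror
theorem outerSpec (i n : Int) (d : PySem.Dict Int Int) (L c : Int)
    (h2 : 2 ≤ i) (hn : 0 < n)
    (hkeys : ∀ k ∈ d.keys, 2 ≤ k ∧ k < i)
    (hdvd : ∀ j : Int, 2 ≤ j → j < i → ¬ (j ∣ n))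
    (hP : (d.keys = [] ∧ L = 0 ∧ c = 0) ∨
          (L ∈ d.keys ∧ d.getD L 0 = c ∧ ∀ k ∈ d.keys, k ≤ L)) :
    (aOuter i n d).2 = (cOuter i n L c).2.2 ∧
    0 < (aOuter i n d).2 ∧
    (∀ k ∈ (aOuter i n d).1.keys, 2 ≤ k) ∧
    (1 < (aOuter i n d).2 → ∀ k ∈ (aOuter i n d).1.keys, k < (aOuter i n d).2) ∧
    (((aOuter i n d).1.keys = [] ∧ (cOuter i n L c).1 = 0 ∧ (cOuter i n L c).2.1 = 0) ∨
     ((cOuter i n L c).1 ∈ (aOuter i n d).1.keys ∧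
      (aOuter i n d).1.getD ((cOuter i n L c).1) 0 = (cOuter i n L c).2.1 ∧
      ∀ k ∈ (aOuter i n d).1.keys, k ≤ (cOuter i n L c).1)) := by
  by_cases hstop : i * i ≤ n
  · have hin : i ≤ n := by nlinarith [sq_nonneg i]
    by_cases hm : PySem.Int.mod n i = 0
    · have hfresh : d.contains i = false := by
        rcases h : d.contains i with _ | _
        · rfl
        · exact absurd ((hkeys i ((PySem.Dict.contains_iff_mem_keys d i).mp h)).2) (lt_irrefl i)
      obtain ⟨e1, e2, e3, e4, e5, e6, e7⟩ := innerEntry i n d hn h2 hm hfresh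
      rw [aOuter_step d hstop, cOuter_step_dvd L c hstop hm, ← e1]
      have hrec := outerSpec (i + 1) ((aInner i n d).2) ((aInner i n d).1) i ((cInner i n 0).1)
        (by omega) e2
        (by intro k hk; rw [e5] at hk
            rcases List.mem_append.mp hk with h' | h'
            · exact ⟨(hkeys k h').1, by have := (hkeys k h').2; omega⟩
            · have hki : k = i := by simpa using h'
              exact ⟨by omega, by omega⟩)
        (by intro j hj1 hj2 hjd
            rcases lt_or_ge j i with h' | h'
            · exact hdvd j hj1 h' (dvd_trans hjd e3)
            · have : j = i := by omega
              exact e4 (this ▸ hjd))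
        (by right
            refine ⟨?_, e6, ?_⟩
            · rw [e5]; simp
            · intro k hk; rw [e5] at hk
              rcases List.mem_append.mp hk with h' | h'
              · exact le_of_lt (hkeys k h').2
              · simp at h'; omega)
      exact hrec
    · rw [aOuter_step d hstop, cOuter_step_ndvd L c hstop hm,
          aInner_stop d (by tauto)]
      exact outerSpec (i + 1) n d L c (by omega) hn
        (fun k hk => ⟨(hkeys k hk).1, by have := (hkeys k hk).2; omega⟩)
        (by intro j hj1 hj2 hjd
            rcases lt_or_ge j i with h' | h'
            · exact hdvd j hj1 h' hjd
            · have : j = i := by omega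
              exact hm ((PySem.Int.mod_eq_zero_iff_dvd n i).mpr (this ▸ hjd)))
        hP
  · rw [aOuter_stop d hstop, cOuter_stop L c hstop]
    refine ⟨rfl, hn, fun k hk => (hkeys k hk).1, ?_, ?_⟩
    · intro h1 k hk
      have hni : i ≤ n := by
        by_contra hlt
        have hlt' : n < i := by omega
        exact hdvd n (by omega) (by omega) (dvd_refl n)
      have := (hkeys k hk).2
      omega
    · rcases hP with ⟨ha, hb, hc⟩ | ⟨ha, hb, hc⟩
      · exact Or.inl ⟨ha, hb, hc⟩
      · exact Or.inr ⟨ha, hb, hc⟩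
termination_by (n + 1 - i).toNat
decreasing_by
  · exact pvDecOuterA i n d hstop
  · exact pvDecSpf i n hstop

theorem max_keys_eq (ks : List Int) (L : Int) (hmem : L ∈ ks) (hub : ∀ k ∈ ks, k ≤ L) :
    PySem.List.max? ks (fun x => x) = some L := by
  cases h : PySem.List.max? ks (fun x => x) with
  | none =>
    rw [PySem.List.max?_eq_none_iff] at h
    rw [h] at hmem
    simp at hmem
  | some m =>
    have h1 : m ∈ ks := PySem.List.max?_mem h
    have h2 : (fun x : Int => x) L ≤ (fun x : Int => x) m := PySem.List.max?_isMax h L hmem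
    have h3 : m ≤ L := hub m h1
    have h2' : L ≤ m := h2
    rw [le_antisymm h3 h2']

-- A's return value equals the readout of the scalar mirror
theorem largePrime_eq_finC (n : Int) :
    largePrime n = (let t := cOuter 2 n 0 0;
                    let m := t.2.2;
                    let L := if 1 < m then m else t.1;
                    let c := if 1 < m then 1 else t.2.1;
                    if L = 0 then (0:Int) else if 1 < c then 1 else 0) := by
  unfold largePrime
  dsimp only
  by_cases hn : 0 < n
  · obtain ⟨E1, E2, E3, E4, E5⟩ := outerSpec 2 n PySem.Dict.empty 0 0 (by omega) hn
      (by intro k hk; rw [PySem.Dict.keys_empty] at hk; simp at hk)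
      (by intro j hj1 hj2 _; omega)
      (Or.inl ⟨PySem.Dict.keys_empty, rfl, rfl⟩)
    rw [← E1]
    by_cases h1 : 1 < (aOuter 2 n PySem.Dict.empty).2
    · simp only [h1, if_true]
      have hfresh : (aOuter 2 n PySem.Dict.empty).1.contains ((aOuter 2 n PySem.Dict.empty).2) = false := by
        rcases h : (aOuter 2 n PySem.Dict.empty).1.contains ((aOuter 2 n PySem.Dict.empty).2) with _ | _
        · rfl
        · have hmem := (PySem.Dict.contains_iff_mem_keys _ _).mp h
          have := E4 h1 _ hmem
          omega
      rw [hfresh]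
      simp only [Bool.false_eq_true, if_false]
      have hkeys' : ((aOuter 2 n PySem.Dict.empty).1.insert ((aOuter 2 n PySem.Dict.empty).2) 1).keys
          = (aOuter 2 n PySem.Dict.empty).1.keys ++ [(aOuter 2 n PySem.Dict.empty).2] :=
        PySem.Dict.keys_insert_of_not_contains _ 1 hfresh
      have hne : ((aOuter 2 n PySem.Dict.empty).1.insert ((aOuter 2 n PySem.Dict.empty).2) 1) ≠ PySem.Dict.empty := by
        intro h
        rw [h, PySem.Dict.keys_empty] at hkeys'
        exact List.cons_ne_nil _ _ (List.append_eq_nil_iff.mp hkeys'.symm).2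
      rw [if_neg hne]
      have hmax := max_keys_eq (((aOuter 2 n PySem.Dict.empty).1.insert ((aOuter 2 n PySem.Dict.empty).2) 1).keys) ((aOuter 2 n PySem.Dict.empty).2)
        (by rw [hkeys']; simp)
        (by intro k hk
            rw [hkeys'] at hk
            rcases List.mem_append.mp hk with h' | h'
            · exact le_of_lt (E4 h1 k h')
            · simp at h'; omega)
      rw [hmax]
      dsimp only
      rw [PySem.Dict.getD_insert_self]
      have hL0 : ¬ ((aOuter 2 n PySem.Dict.empty).2 = 0) := by omega
      rw [if_neg hL0]
    · simp only [h1, if_false]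
      rcases E5 with ⟨hk, hL, hc⟩ | ⟨hmem, hgd, hub⟩
      · rw [keys_nil_eq_empty _ hk, hL]
        simp
      · have hne : (aOuter 2 n PySem.Dict.empty).1 ≠ PySem.Dict.empty := by
          intro h
          rw [h, PySem.Dict.keys_empty] at hmem
          simp at hmem
        rw [if_neg hne]
        have hmax := max_keys_eq _ _ hmem hub
        rw [hmax]
        dsimp only
        rw [hgd]
        have hL0 : ¬ ((cOuter 2 n 0 0).1 = 0) := by
          have := E3 _ hmem
          omega
        rw [if_neg hL0]
  · have hstop : ¬ ((2:Int) * 2 ≤ n) := by omega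
    rw [aOuter_stop _ hstop, cOuter_stop 0 0 hstop]
    have h1 : ¬ ((1:Int) < n) := by omega
    simp only [h1, if_false, if_true]

-- ===== number theory: lpf is the largest prime factor; exponent > 1 ⟺ square divides =====

theorem lpf_eq_base {m : Int} (h : 2 ≤ m) (hq : PySem.Int.floordiv m (spfLoop 2 m) = 1) :
    lpf m = spfLoop 2 m := by
  rw [lpf]; simp [h, hq]

theorem lpf_eq_rec {m : Int} (h : 2 ≤ m) (hq : ¬ PySem.Int.floordiv m (spfLoop 2 m) = 1) :
    lpf m = lpf (PySem.Int.floordiv m (spfLoop 2 m)) := by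
  rw [lpf]; simp [h, hq]

-- minimality: spfLoop d m is ≤ every divisor j ≥ 2, given no divisor below d exists
theorem spf_min (d m : Int) (hd : 2 ≤ d) (hm : 2 ≤ m)
    (hinv : ∀ t : Int, 2 ≤ t → t < d → ¬ t ∣ m) :
    ∀ j : Int, 2 ≤ j → j ∣ m → spfLoop d m ≤ j := by
  fun_induction spfLoop d m with
  | case1 d h hz =>
    intro j hj2 hjd
    by_contra hlt
    exact hinv j hj2 (by omega) hjd
  | case2 d h hz ih =>
    refine ih (by omega) ?_
    intro t ht2 htd htm
    rcases lt_or_ge t d with h' | h'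
    · exact hinv t ht2 h' htm
    · have : t = d := by omega
      exact hz ((PySem.Int.mod_eq_zero_iff_dvd m d).mpr (this ▸ htm))
  | case3 d h =>
    intro j hj2 hjd
    -- no divisor with square ≤ m from d upward: every divisor j ≥ 2 equals m
    obtain ⟨r, hr⟩ := hjd
    have hr1 : 1 ≤ r := by nlinarith
    rcases eq_or_lt_of_le hr1 with h1 | h1
    · nlinarith
    · -- r ≥ 2 is also a divisor; both j and r are ≥ d, so m ≥ d*d, contradiction
      have hjge : d ≤ j := by
        by_contra hlt
        exact hinv j hj2 (by omega) ⟨r, hr⟩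
      have hrge : d ≤ r := by
        by_contra hlt
        exact hinv r (by omega) (by omega) ⟨j, by rw [hr]; ring⟩
      nlinarith

theorem prime_of_no_divisors (p : Int) (h2 : 2 ≤ p)
    (h : ∀ t : Int, 2 ≤ t → t < p → ¬ t ∣ p) : Prime p := by
  rw [Int.prime_iff_natAbs_prime]
  rw [Nat.prime_def_lt]
  constructor
  · omega
  · intro t htlt htd
    by_contra ht1
    have ht0 : t ≠ 0 := by
      intro h0
      rw [h0] at htd
      have := Nat.eq_zero_of_zero_dvd htd
      omega
    have ht2 : 2 ≤ t := by omega
    have htdZ : (t : Int) ∣ p := by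
      have : (t : Int) ∣ (p.natAbs : Int) := Int.natCast_dvd_natCast.mpr htd
      rwa [Int.natAbs_of_nonneg (by omega)] at this
    exact h t (by exact_mod_cast ht2) (by omega) htdZ

theorem prime_pos_dvd_eq (p q : Int) (hp : Prime p) (hq : Prime q)
    (hp2 : 2 ≤ p) (hq2 : 2 ≤ q) (hd : p ∣ q) : p = q := by
  have h1 : p.natAbs ∣ q.natAbs := Int.natAbs_dvd_natAbs.mpr hd
  have h2 := (Int.prime_iff_natAbs_prime.mp hq).eq_one_or_self_of_dvd p.natAbs h1
  omega

theorem spf_prime (m : Int) (hm : 2 ≤ m) : Prime (spfLoop 2 m) := by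
  obtain ⟨hdvd, h2⟩ := spfLoop_div 2 m (le_refl 2) hm
  apply prime_of_no_divisors _ h2
  intro t ht2 htlt htd
  have := spf_min 2 m (le_refl 2) hm (by intro t ht2 htlt; omega) t ht2 (dvd_trans htd hdvd)
  omega

-- lpf m is the largest (positive) prime factor of m, for m ≥ 2
theorem lpf_spec : ∀ K : Nat, ∀ m : Int, m.toNat ≤ K → 2 ≤ m →
    Prime (lpf m) ∧ 2 ≤ lpf m ∧ lpf m ∣ m ∧
    (∀ q : Int, Prime q → 2 ≤ q → q ∣ m → q ≤ lpf m) := by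
  intro K
  induction K with
  | zero => intro m hK hm; omega
  | succ K ih =>
    intro m hK hm
    obtain ⟨hdvd, hp2⟩ := spfLoop_div 2 m (le_refl 2) hm
    have hprime := spf_prime m hm
    have hfd : PySem.Int.floordiv m (spfLoop 2 m) = m / spfLoop 2 m :=
      PySem.Int.floordiv_eq_ediv_of_pos (by omega)
    have hqm : m / spfLoop 2 m * spfLoop 2 m = m := Int.ediv_mul_cancel hdvd
    by_cases hq : PySem.Int.floordiv m (spfLoop 2 m) = 1
    · -- m = spfLoop 2 m
      rw [lpf_eq_base hm hq]
      rw [hfd] at hq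
      have hmp : spfLoop 2 m = m := by
        have h1 : (1:Int) * spfLoop 2 m = m := by rw [← hq]; exact hqm
        rw [one_mul] at h1
        exact h1
      refine ⟨hprime, hp2, hdvd, ?_⟩
      intro q hqp hq2 hqd
      have hqd' : q ∣ spfLoop 2 m := by rw [hmp]; exact hqd
      have := prime_pos_dvd_eq q _ hqp hprime hq2 hp2 hqd'
      omega
    · rw [lpf_eq_rec hm hq]
      rw [hfd] at hq ⊢
      have hq0m : m / spfLoop 2 m * spfLoop 2 m = m := hqm
      have hq0pos : 1 ≤ m / spfLoop 2 m := by
        by_contra hlt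
        rw [not_le] at hlt
        nlinarith
      have hq02 : 2 ≤ m / spfLoop 2 m := by
        rcases eq_or_lt_of_le hq0pos with h | h
        · exact absurd h.symm hq
        · omega
      set q0 : Int := m / spfLoop 2 m with hq0def
      have hq0lt : q0 < m := by nlinarith
      have hq0K : q0.toNat ≤ K := by omega
      obtain ⟨i1, i2, i3, i4⟩ := ih q0 hq0K hq02
      have hq0dvd : q0 ∣ m := ⟨spfLoop 2 m, hq0m.symm⟩
      refine ⟨i1, i2, dvd_trans i3 hq0dvd, ?_⟩
      intro q hqp hq2 hqd
      -- q divides q0 * p: q ∣ q0 or q ∣ p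
      have : q ∣ q0 * spfLoop 2 m := by rw [hq0m]; exact hqd
      rcases (Prime.dvd_mul hqp).mp this with h' | h'
      · exact i4 q hqp hq2 h'
      · have hqe : q = spfLoop 2 m := prime_pos_dvd_eq q _ hqp hprime hq2 hp2 h'
        -- p = spf m is minimal among divisors ≥ 2, and lpf q0 divides m
        have := spf_min 2 m (le_refl 2) hm (by intro t ht2 htlt; omega)
          (lpf q0) i2 (dvd_trans i3 hq0dvd)
        omega

-- if n has no divisor in [2, n) then every divisor ≥ 2 is n itself
theorem all_div_eq_self (n i : Int) (h2 : 2 ≤ i) (hn : 2 ≤ n) (hii : ¬ i * i ≤ n)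
    (hinv : ∀ j : Int, 2 ≤ j → j < i → ¬ j ∣ n) :
    ∀ j : Int, 2 ≤ j → j ∣ n → j = n := by
  intro j hj2 hjd
  obtain ⟨r, hr⟩ := hjd
  have hr1 : 1 ≤ r := by nlinarith
  rcases eq_or_lt_of_le hr1 with h1 | h1
  · rw [hr, ← h1]; ring
  · exfalso
    have hjge : i ≤ j := by
      by_contra hlt
      exact hinv j hj2 (by omega) ⟨r, hr⟩
    have hrge : i ≤ r := by
      by_contra hlt
      exact hinv r (by omega) (by omega) ⟨j, by rw [hr]; ring⟩
    nlinarith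

theorem sq_not_dvd_self {n : Int} (hn : 2 ≤ n) : ¬ n * n ∣ n := by
  intro h
  have := Int.le_of_dvd (by omega) h
  nlinarith

-- exponent characterisation of cInner
theorem cInner_spec (i : Int) (hi : 2 ≤ i) : ∀ K : Nat, ∀ n c : Int, n.toNat ≤ K → 0 < n →
    ∃ e : Nat, (cInner i n c).1 = c + (e : Int) ∧ n = i ^ e * (cInner i n c).2 ∧
      0 < (cInner i n c).2 ∧ ¬ i ∣ (cInner i n c).2 ∧ (i ∣ n → 1 ≤ e) := by
  intro K
  induction K with
  | zero => intro n c hK hn; omega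
  | succ K ih =>
    intro n c hK hn
    by_cases hm : PySem.Int.mod n i = 0
    · have hg : 0 < n ∧ 2 ≤ i ∧ PySem.Int.mod n i = 0 := ⟨hn, hi, hm⟩
      rw [cInner_step c hg]
      have hpos := pvDivPos hn hi hm
      have hlt := pvDivShrink hn hi hm
      obtain ⟨e, e1, e2, e3, e4, _⟩ := ih (PySem.Int.floordiv n i) (c + 1) (by omega) hpos
      refine ⟨e + 1, by push_cast; omega, ?_, e3, e4, fun _ => by omega⟩
      have hni : PySem.Int.floordiv n i * i = n := by
        rw [PySem.Int.floordiv_eq_ediv_of_pos (by omega)]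
        exact Int.ediv_mul_cancel ((PySem.Int.mod_eq_zero_iff_dvd n i).mp hm)
      have e2' : i ^ (e + 1) * (cInner i (PySem.Int.floordiv n i) (c + 1)).2 = n := by
        rw [pow_succ]
        calc i ^ e * i * (cInner i (PySem.Int.floordiv n i) (c + 1)).2
            = i ^ e * (cInner i (PySem.Int.floordiv n i) (c + 1)).2 * i := by ring
        _ = PySem.Int.floordiv n i * i := by rw [← e2]
        _ = n := hni
      exact e2'.symm
    · rw [cInner_stop c (by tauto)]
      refine ⟨0, by simp, by simp, hn, ?_, ?_⟩
      · exact fun hd => hm ((PySem.Int.mod_eq_zero_iff_dvd n i).mpr hd)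
      · intro hd
        exact absurd ((PySem.Int.mod_eq_zero_iff_dvd n i).mpr hd) hm

-- i is prime whenever it divides n and nothing in [2, i) divides n
theorem factor_prime (i n : Int) (h2 : 2 ≤ i) (hin : i ∣ n)
    (hinv : ∀ j : Int, 2 ≤ j → j < i → ¬ j ∣ n) : Prime i := by
  apply prime_of_no_divisors i h2
  intro t ht2 htlt htd
  exact hinv t ht2 htlt (dvd_trans htd hin)

-- main invariant: the scalar mirror's readout equals B's square test
theorem coreC : ∀ K : Nat, ∀ G : Nat, ∀ n i L c : Int,
    n.toNat ≤ K → (n + 1 - i).toNat ≤ G → 1 ≤ n → 2 ≤ i →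
    (∀ j : Int, 2 ≤ j → j < i → ¬ j ∣ n) →
    finC (cOuter i n L c) =
      if n = 1 then finC (L, c, 1) else if lpf n * lpf n ∣ n then 1 else 0 := by
  intro K
  induction K with
  | zero => intro G n i L c hK _ hn; omega
  | succ K ihK =>
    intro G
    induction G with
    | zero =>
      intro n i L c hK hG hn hi hinv
      have hstop : ¬ i * i ≤ n := by
        have hni2 : n + 1 ≤ i := by omega
        nlinarith
      rw [cOuter_stop L c hstop]
      rcases eq_or_lt_of_le hn with h1 | h1
      · rw [if_pos h1.symm, ← h1.symm]
      · rw [if_neg (by omega)]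
        have hall := all_div_eq_self n i hi (by omega) hstop hinv
        obtain ⟨_, hl2, hld, _⟩ := lpf_spec n.toNat n (le_refl _) (by omega)
        have hln : lpf n = n := hall (lpf n) hl2 hld
        rw [hln, if_neg (sq_not_dvd_self (by omega))]
        simp [finC, h1]
    | succ G ihG =>
      intro n i L c hK hG hn hi hinv
      by_cases hstop : i * i ≤ n
      · have hn4 : 2 ≤ n := by nlinarith
        have hin : i ≤ n := pvSqLe hstop
        by_cases hm : PySem.Int.mod n i = 0
        · -- i divides n: strip i^e, recurse on the strictly smaller n1 via the K-induction
          have hidvd : i ∣ n := (PySem.Int.mod_eq_zero_iff_dvd n i).mp hm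
          have hiprime := factor_prime i n hi hidvd hinv
          rw [cOuter_step_dvd L c hstop hm]
          obtain ⟨e, e1, e2, e3, e4, e5⟩ := cInner_spec i hi n.toNat n 0 (le_refl _) (by omega)
          have he1 : 1 ≤ e := e5 hidvd
          set n1 : Int := (cInner i n 0).2 with hn1
          have hn1lt : n1 < n := by
            have hpe : (2:Int) ≤ i ^ e := by
              calc (2:Int) = 2^1 := by norm_num
              _ ≤ 2^e := by apply pow_le_pow_right₀ <;> omega
              _ ≤ i^e := by apply pow_le_pow_left₀ <;> omega
            nlinarith
          have hn1K : n1.toNat ≤ K := by omega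
          have hn1dvd : n1 ∣ n := ⟨i ^ e, by rw [e2]; ring⟩
          have hrec := ihK ((n1 + 1 - (i+1)).toNat) n1 (i + 1) i (cInner i n 0).1
            hn1K (le_refl _) (by omega) (by omega)
            (by intro j hj2 hjlt hjd
                rcases lt_or_ge j i with h' | h'
                · exact hinv j hj2 h' (dvd_trans hjd hn1dvd)
                · have : j = i := by omega
                  exact e4 (this ▸ hjd))
          rw [hrec, if_neg (show ¬ n = 1 by omega)]
          have hke : (cInner i n 0).1 = (e : Int) := by omega
          by_cases h1 : n1 = 1
          · -- n = i^e: answer is [e ≥ 2]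
            rw [if_pos h1]
            have hne : n = i ^ e := by rw [e2, h1]; ring
            have hlpf : lpf n = i := by
              obtain ⟨hl1, hl2, hl3, _⟩ := lpf_spec n.toNat n (le_refl _) (by omega)
              have : lpf n ∣ i := by
                apply hl1.dvd_of_dvd_pow (n := e)
                rw [← hne]; exact hl3
              exact prime_pos_dvd_eq _ _ hl1 hiprime hl2 hi this
            rw [hlpf]
            simp only [finC, hke]
            rw [if_neg (by omega), if_neg (by omega)]
            by_cases he2 : 2 ≤ e
            · rw [if_pos (by exact_mod_cast by omega : (1:Int) < (e:Int))]
              rw [if_pos]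
              rw [hne]
              have : i * i = i ^ 2 := by ring
              rw [this]
              exact pow_dvd_pow i he2
            · have hee : e = 1 := by omega
              rw [if_neg (by exact_mod_cast by omega : ¬ (1:Int) < (e:Int))]
              rw [if_neg]
              rw [hne, hee, pow_one]
              exact sq_not_dvd_self (by omega)
          · -- n1 ≥ 2: lpf n = lpf n1 and square-divisibility transfers
            rw [if_neg h1]
            have hn12 : 2 ≤ n1 := by omega
            obtain ⟨j1, j2, j3, j4⟩ := lpf_spec n1.toNat n1 (le_refl _) hn12
            have hQi : i < lpf n1 := by
              rcases lt_trichotomy (lpf n1) i with h' | h' | h'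
              · exact absurd (dvd_trans j3 hn1dvd) (hinv _ j2 h')
              · exact absurd (h' ▸ j3) e4
              · exact h'
            have hlpfn : lpf n = lpf n1 := by
              obtain ⟨k1, k2, k3, k4⟩ := lpf_spec n.toNat n (le_refl _) (by omega)
              have hle1 : lpf n1 ≤ lpf n := k4 _ j1 j2 (dvd_trans j3 hn1dvd)
              have hle2 : lpf n ≤ lpf n1 := by
                have : lpf n ∣ i ^ e * n1 := by rw [← e2]; exact k3
                rcases (Prime.dvd_mul k1).mp this with h' | h'
                · have : lpf n ∣ i := k1.dvd_of_dvd_pow h'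
                  have := prime_pos_dvd_eq _ _ k1 hiprime k2 hi this
                  omega
                · exact j4 _ k1 k2 h'
              omega
            rw [hlpfn]
            -- lpf n1 * lpf n1 ∣ n ↔ ∣ n1: Q² ∣ i^e·Q·t ⇒ Q ∣ i^e·t ⇒ Q ∣ t
            have hiff : lpf n1 * lpf n1 ∣ n ↔ lpf n1 * lpf n1 ∣ n1 := by
              constructor
              · intro hdn
                obtain ⟨t, ht⟩ := j3
                obtain ⟨s, hs⟩ := hdn
                have hQ0 : lpf n1 ≠ 0 := by omega
                have hcan : i ^ e * t = lpf n1 * s := by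
                  apply mul_left_cancel₀ hQ0
                  calc lpf n1 * (i ^ e * t) = i ^ e * (lpf n1 * t) := by ring
                  _ = i ^ e * n1 := by rw [← ht]
                  _ = n := e2.symm
                  _ = lpf n1 * lpf n1 * s := hs
                  _ = lpf n1 * (lpf n1 * s) := by ring
                have hQt : lpf n1 ∣ t := by
                  have hd2 : lpf n1 ∣ i ^ e * t := ⟨s, hcan⟩
                  rcases (Prime.dvd_mul j1).mp hd2 with h' | h'
                  · have hdi : lpf n1 ∣ i := j1.dvd_of_dvd_pow h'
                    have := prime_pos_dvd_eq _ _ j1 hiprime j2 hi hdi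
                    omega
                  · exact h'
                obtain ⟨u, hu⟩ := hQt
                refine ⟨u, ?_⟩
                calc n1 = lpf n1 * t := ht
                _ = lpf n1 * (lpf n1 * u) := by rw [hu]
                _ = lpf n1 * lpf n1 * u := by ring
              · intro h'
                exact dvd_trans h' hn1dvd
            by_cases hsq : lpf n1 * lpf n1 ∣ n1
            · rw [if_pos hsq, if_pos (hiff.mpr hsq)]
            · rw [if_neg hsq, if_neg (fun h' => hsq (hiff.mp h'))]
        · -- i does not divide n: advance i
          rw [cOuter_step_ndvd L c hstop hm]
          exact ihG n (i + 1) L c hK (by omega) hn (by omega)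
            (by intro j hj2 hjlt hjd
                rcases lt_or_ge j i with h' | h'
                · exact hinv j hj2 h' hjd
                · have : j = i := by omega
                  exact hm ((PySem.Int.mod_eq_zero_iff_dvd n i).mpr (this ▸ hjd)))
      · -- loop exit: n is 1 or prime
        rw [cOuter_stop L c hstop]
        rcases eq_or_lt_of_le hn with h1 | h1
        · rw [if_pos h1.symm, ← h1.symm]
        · rw [if_neg (by omega)]
          have hall := all_div_eq_self n i hi (by omega) hstop hinv
          obtain ⟨_, hl2, hld, _⟩ := lpf_spec n.toNat n (le_refl _) (by omega)
          have hln : lpf n = n := hall (lpf n) hl2 hld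
          rw [hln, if_neg (sq_not_dvd_self (by omega))]
          simp [finC, h1]

-- assembling: A = scalar mirror readout = B
theorem largePrime_eq_alt (n : Int) : largePrime n = largePrime_alt n := by
  rw [largePrime_eq_finC]
  unfold largePrime_alt
  by_cases hn : n ≤ 1
  · rw [if_pos hn]
    have hstop : ¬ (2:Int) * 2 ≤ n := by omega
    rw [cOuter_stop 0 0 hstop]
    simp only
    rw [if_neg (by omega : ¬ (1:Int) < n)]
    simp
  · rw [if_neg hn]
    have hn2 : 2 ≤ n := by omega
    have hcore := coreC n.toNat ((n + 1 - 2).toNat) n 2 0 0 (le_refl _) (le_refl _)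
      (by omega) (le_refl 2) (by intro j hj2 hjlt; omega)
    rw [if_neg (by omega : ¬ n = 1)] at hcore
    have hfin : (let t := cOuter 2 n 0 0;
                 let m := t.2.2;
                 let L := if 1 < m then m else t.1;
                 let c := if 1 < m then 1 else t.2.1;
                 if L = 0 then (0:Int) else if 1 < c then 1 else 0) = finC (cOuter 2 n 0 0) := by
      simp only [finC]
      by_cases h1 : 1 < (cOuter 2 n 0 0).2.2
      · simp only [h1, if_true]
        rw [if_neg (by omega), if_neg (by omega)]
      · simp only [h1, if_false]
    rw [hfin, hcore]
    by_cases hd : lpf n * lpf n ∣ n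
    · rw [if_pos hd, if_pos ((PySem.Int.mod_eq_zero_iff_dvd n _).mpr hd)]
    · rw [if_neg hd, if_neg (fun h => hd ((PySem.Int.mod_eq_zero_iff_dvd n _).mp h))]

-- ===== VERDICT (by name: the statement is the Claim_ definition above) =====
theorem largePrime_spec : Claim_equal_largePrime := by
  intro n _
  exact largePrime_eq_alt n
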